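-- pv_equiv track=rewrite | github.com/Abinesh2418/KASPARRO-hAcKaThON | backend/app/services/orchestrator_service.py | _extract_color_constraints
-- ===== SOURCE A (Python) =====
-- _COLOR_FAMILIES: dict[str, list[str]] = {
--     "black": ["black", "matte black", "midnight black", "jet black", "charcoal"],
--     "white": ["white", "ivory", "cream", "off white", "off-white"],
--     "silver": ["silver", "silver mesh", "steel", "grey", "gray"],
--     "gold": ["gold", "rose gold", "yellow gold", "gold-silver"],
--     "brown": ["brown", "tan", "cognac", "chocolate", "leather", "camel"],
--     "blue": ["blue", "navy", "cobalt", "cobalt navy", "steel blue", "indigo", "teal", "turquoise"],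
--     "red": ["red", "crimson", "burgundy", "maroon", "rust"],
--     "green": ["green", "olive", "forest green", "sage", "mint", "sage green", "mint green", "emerald", "teal green", "bottle green", "pista"],
--     "pink": ["pink", "rose", "blush", "dusty pink", "mauve"],
--     "yellow": ["yellow", "mustard", "golden yellow", "lemon"],
--     "orange": ["orange", "rust", "saffron", "peach"],
--     "purple": ["purple", "lavender", "violet", "lilac", "plum"],
-- }
--
-- def _extract_color_constraints(constraints: list[str], preferences: list[str] | None = None, raw_message: str = "") -> list[str]:
--     """Extract explicit color constraints from intent fields AND the raw user message."""
--     known = set(_COLOR_FAMILIES.keys())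
--     found = set()
--     # Scan constraints[], preferences[], and the raw message
--     sources = list(constraints) + (preferences or []) + [raw_message]
--     for text in sources:
--         text_low = text.lower()
--         for color in known:
--             if color in text_low:
--                 found.add(color)
--     return list(found)
-- ===== SOURCE B (Python) =====
-- _COLOR_FAMILIES: dict[str, list[str]] = {
--     "black": ["black", "matte black", "midnight black", "jet black", "charcoal"],
--     "white": ["white", "ivory", "cream", "off white", "off-white"],
--     "silver": ["silver", "silver mesh", "steel", "grey", "gray"],
--     "gold": ["gold", "rose gold", "yellow gold", "gold-silver"],
--     "brown": ["brown", "tan", "cognac", "chocolate", "leather", "camel"],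
--     "blue": ["blue", "navy", "cobalt", "cobalt navy", "steel blue", "indigo", "teal", "turquoise"],
--     "red": ["red", "crimson", "burgundy", "maroon", "rust"],
--     "green": ["green", "olive", "forest green", "sage", "mint", "sage green", "mint green", "emerald", "teal green", "bottle green", "pista"],
--     "pink": ["pink", "rose", "blush", "dusty pink", "mauve"],
--     "yellow": ["yellow", "mustard", "golden yellow", "lemon"],
--     "orange": ["orange", "rust", "saffron", "peach"],
--     "purple": ["purple", "lavender", "violet", "lilac", "plum"],
-- }
--
-- # bucket the color names by first letter: the positional scan only tests the
-- # names that can start at the current character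
-- _BY_FIRST: dict[str, list[str]] = {}
-- for _color in _COLOR_FAMILIES:
--     _BY_FIRST.setdefault(_color[0], []).append(_color)
--
--
-- def _extract_color_constraints(constraints: list[str], preferences: list[str] | None = None, raw_message: str = "") -> list[str]:
--     """Extract explicit color constraints from intent fields AND the raw user message."""
--     # Join every source into ONE text with a '\n' separator (color names are letters only,
--     # so no match can straddle a boundary) and do a single positional scan over it,
--     # testing at each position which color names start there.
--     text = "\n".join([*constraints, *(preferences or []), raw_message]).lower()
--     hits = set()
--     for i in range(len(text)):
--         for color in _BY_FIRST.get(text[i], ()):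
--             if text.startswith(color, i):
--                 hits.add(color)
--     return list(hits)
-- ===== Notes on version B (the rewrite author's own statement) =====
-- stated objective: alternative
-- what changed: Instead of testing each of the 12 color keys for substring containment in each source separately, B joins all sources into one newline-separated text (the keys are letter-only, so no match can straddle a boundary), lowercases it once, and performs a single positional scan that at each position tests only the color names bucketed under that position's first letter; A's list(set) output order is hash-arbitrary, only the set of colors is specified.
import Mathlib
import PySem

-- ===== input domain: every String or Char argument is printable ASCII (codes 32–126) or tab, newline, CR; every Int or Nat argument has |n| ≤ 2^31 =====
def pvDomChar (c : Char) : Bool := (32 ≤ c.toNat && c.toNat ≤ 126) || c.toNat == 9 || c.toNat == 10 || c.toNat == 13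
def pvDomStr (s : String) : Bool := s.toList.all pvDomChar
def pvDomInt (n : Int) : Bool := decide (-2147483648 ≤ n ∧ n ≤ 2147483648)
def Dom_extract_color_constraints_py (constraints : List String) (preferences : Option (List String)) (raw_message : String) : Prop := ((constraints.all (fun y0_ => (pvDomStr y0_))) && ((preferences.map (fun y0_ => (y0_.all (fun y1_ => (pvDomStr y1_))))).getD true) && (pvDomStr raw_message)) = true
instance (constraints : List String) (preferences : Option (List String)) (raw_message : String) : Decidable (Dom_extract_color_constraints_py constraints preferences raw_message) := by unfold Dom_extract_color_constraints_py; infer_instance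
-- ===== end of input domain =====

-- B replaces A's per-source color-in-text containment loop by a single positional scan:
-- it joins all sources into one '\n'-separated text (color keys are letter-only, so no
-- match straddles a boundary), lowercases it once, and at each position collects the
-- color names starting there; equivalence is about the RETURN value as a set of colors
-- (A's list(set) order is hash-arbitrary).

-- ===== PORT A =====
-- keys of _COLOR_FAMILIES, in dict insertion order
def pvColorKeys : List String :=
  ["black", "white", "silver", "gold", "brown", "blue",
   "red", "green", "pink", "yellow", "orange", "purple"]

def extract_color_constraints_py (constraints : List String) (preferences : Option (List String)) (raw_message : String) : List String :=
  let known : PySem.Set String := PySem.Set.ofList pvColorKeys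
  let sources : List String := constraints ++ (preferences.getD []) ++ [raw_message]
  let found : PySem.Set String :=
    sources.foldl (fun found text =>
      let text_low := PySem.Str.lower text
      known.foldl (fun found color =>
        if PySem.Str.isIn color text_low then PySem.Set.add found color else found) found)
      PySem.Set.empty
  -- return list(found): CPython iterates the set `found` in hash order, which is unspecified
  -- (the result is compared as a set); we enumerate found's elements in the fixed key order.
  pvColorKeys.filter (fun c => PySem.Set.contains found c)

-- ===== PORT B =====
-- _BY_FIRST: the color keys bucketed by first letter, buckets in key insertion order
def pvByFirst (ch : Char) : List String :=
  match ch with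
  | 'b' => ["black", "brown", "blue"]
  | 'w' => ["white"]
  | 's' => ["silver"]
  | 'g' => ["gold", "green"]
  | 'r' => ["red"]
  | 'p' => ["pink", "purple"]
  | 'y' => ["yellow"]
  | 'o' => ["orange"]
  | _ => []

def extract_color_constraints_py_alt (constraints : List String) (preferences : Option (List String)) (raw_message : String) : List String :=
  -- "\n".join([*constraints, *(preferences or []), raw_message]).lower(), on the List Char
  -- side (PySem.Chars.join/lower are exact)
  let text : List Char :=
    PySem.Chars.lower (PySem.Chars.join ['\n']
      ((constraints ++ (preferences.getD []) ++ [raw_message]).map String.toList))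
  -- for i in range(len(text)): text.startswith(color, i) — Python's startswith with a
  -- start index 0 ≤ i is exactly a prefix test on text.drop i
  -- for color in _BY_FIRST.get(text[i], ()) — i is in range, so text[i] is text.getD i
  let hits : PySem.Set String :=
    (List.range text.length).foldl (fun hits i =>
      (pvByFirst (text.getD i ' ')).foldl (fun hits color =>
        if PySem.Chars.startswith (text.drop i) color.toList then PySem.Set.add hits color
        else hits) hits)
      PySem.Set.empty
  -- return list(hits): set iteration order unspecified; enumerate in the fixed key order
  pvColorKeys.filter (fun c => PySem.Set.contains hits c)

-- ===== PRECONDITION & SPEC =====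
def Spec_extract_color_constraints_py (constraints : List String) (preferences : Option (List String)) (raw_message : String) (out : List String) : Prop := out = extract_color_constraints_py_alt constraints preferences raw_message
instance (constraints : List String) (preferences : Option (List String)) (raw_message : String) (out : List String) : Decidable (Spec_extract_color_constraints_py constraints preferences raw_message out) := by unfold Spec_extract_color_constraints_py; infer_instance

-- ===== CLAIM (what is proved, stated in full; the proofs are below) =====
def Claim_equal_extract_color_constraints_py : Prop := ∀ (constraints : List String) (preferences : Option (List String)) (raw_message : String), Dom_extract_color_constraints_py constraints preferences raw_message → Spec_extract_color_constraints_py constraints preferences raw_message (extract_color_constraints_py constraints preferences raw_message)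

-- ===== LEMMAS AND PROOFS =====

-- membership after an inner loop over the keys with an arbitrary test p
lemma pv_mem_inner (keys : List String) (p : String → Bool) (f : PySem.Set String) (x : String) :
    x ∈ keys.foldl (fun s c => if p c then PySem.Set.add s c else s) f ↔
      x ∈ f ∨ (x ∈ keys ∧ p x = true) := by
  induction keys generalizing f with
  | nil => simp
  | cons c keys ih =>
    by_cases hp : p c = true
    · simp only [List.foldl_cons, if_pos hp, ih, PySem.Set.mem_add, List.mem_cons]
      constructor
      · rintro ((hf | rfl) | ⟨hm, hx⟩)
        exacts [Or.inl hf, Or.inr ⟨Or.inl rfl, hp⟩, Or.inr ⟨Or.inr hm, hx⟩]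
      · rintro (hf | ⟨(rfl | hm), hx⟩)
        exacts [Or.inl (Or.inl hf), Or.inl (Or.inr rfl), Or.inr ⟨hm, hx⟩]
    · simp only [List.foldl_cons, if_neg hp, ih, List.mem_cons]
      constructor
      · rintro (hf | ⟨hm, hx⟩)
        exacts [Or.inl hf, Or.inr ⟨Or.inr hm, hx⟩]
      · rintro (hf | ⟨(rfl | hm), hx⟩)
        exacts [Or.inl hf, absurd hx hp, Or.inr ⟨hm, hx⟩]

-- membership after a doubly-nested accumulation loop (outer over any index list,
-- inner key list may depend on the index)
lemma pv_mem_scan {ι : Type} (keys : ι → List String) (idxs : List ι) (p : ι → String → Bool)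
    (f : PySem.Set String) (x : String) :
    x ∈ idxs.foldl (fun f i =>
        (keys i).foldl (fun s c => if p i c then PySem.Set.add s c else s) f) f ↔
      x ∈ f ∨ ∃ i ∈ idxs, x ∈ keys i ∧ p i x = true := by
  induction idxs generalizing f with
  | nil => simp
  | cons i idxs ih =>
    simp only [List.foldl_cons, ih, pv_mem_inner]
    constructor
    · rintro ((hf | ⟨hk, hi⟩) | ⟨j, hj, hk, hxj⟩)
      · exact Or.inl hf
      · exact Or.inr ⟨i, List.mem_cons_self .., hk, hi⟩
      · exact Or.inr ⟨j, List.mem_cons_of_mem _ hj, hk, hxj⟩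
    · rintro (hf | ⟨j, hj, hk, hxj⟩)
      · exact Or.inl (Or.inl hf)
      · rcases List.mem_cons.mp hj with rfl | hj
        · exact Or.inl (Or.inr ⟨hk, hxj⟩)
        · exact Or.inr ⟨j, hj, hk, hxj⟩

-- a pattern avoiding the separator cannot straddle it (forward direction)
lemma pv_infix_split_fwd (sep : Char) (s : List Char) (hsep : sep ∉ s) :
    ∀ a b : List Char, s <:+: a ++ sep :: b → s <:+: a ∨ s <:+: b := by
  intro a
  induction a with
  | nil =>
    intro b h
    simp only [List.nil_append] at h
    rcases List.infix_cons_iff.mp h with hp | hi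
    · cases s with
      | nil => exact Or.inl (List.nil_infix)
      | cons x s' =>
        rcases List.cons_prefix_cons.mp hp with ⟨rfl, -⟩
        exact absurd List.mem_cons_self hsep
    · exact Or.inr hi
  | cons x a' ih =>
    intro b h
    rw [List.cons_append] at h
    rcases List.infix_cons_iff.mp h with hp | hi
    · by_cases hl : s.length ≤ (x :: a').length
      · left
        exact (List.prefix_of_prefix_length_le hp
          (List.prefix_append (x :: a') (sep :: b)) hl).isInfix
      · exfalso
        have hl' : (x :: a').length < s.length := Nat.lt_of_not_le hl
        have hxa : (x :: a') <+: s :=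
          List.prefix_of_prefix_length_le (List.prefix_append (x :: a') (sep :: b)) hp
            (Nat.le_of_lt hl')
        rcases hxa with ⟨r, hr⟩
        rcases hp with ⟨u, hu⟩
        have hru : r ++ u = sep :: b := by
          apply List.append_cancel_left (as := x :: a')
          rw [← List.append_assoc, hr, hu]
          rfl
        cases r with
        | nil =>
          rw [← hr] at hl'
          simp at hl'
        | cons y r' =>
          have hy : y = sep := by
            have := congrArg (fun t => t.head?) hru
            simpa using this
          apply hsep
          rw [← hr, hy]
          simp
    · rcases ih b hi with h1 | h2
      · exact Or.inl (h1.trans (List.suffix_cons x a').isInfix)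
      · exact Or.inr h2

lemma pv_infix_split (sep : Char) (s : List Char) (hsep : sep ∉ s) (a b : List Char) :
    s <:+: a ++ sep :: b ↔ s <:+: a ∨ s <:+: b := by
  constructor
  · exact pv_infix_split_fwd sep s hsep a b
  · rintro (h | h)
    · exact h.trans (List.prefix_append a (sep :: b)).isInfix
    · exact h.trans ((List.suffix_cons sep b).trans (List.suffix_append a (sep :: b))).isInfix

-- a separator-free pattern is inside the '\n'-join iff it is inside one of the parts
lemma pv_infix_join (s : List Char) (hsep : '\n' ∉ s) :
    ∀ (l : List Char) (ls : List (List Char)),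
      s <:+: PySem.Chars.join ['\n'] (l :: ls) ↔ ∃ t ∈ l :: ls, s <:+: t := by
  intro l ls
  induction ls generalizing l with
  | nil => simp [PySem.Chars.join_singleton]
  | cons l' ls' ih =>
    rw [PySem.Chars.join_cons_cons]
    rw [show l ++ ['\n'] ++ PySem.Chars.join ['\n'] (l' :: ls')
        = l ++ '\n' :: PySem.Chars.join ['\n'] (l' :: ls') by simp]
    rw [pv_infix_split '\n' s hsep, ih]
    simp only [List.mem_cons]
    constructor
    · rintro (h | ⟨t, ht, hst⟩)
      · exact ⟨l, Or.inl rfl, h⟩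
      · exact ⟨t, Or.inr ht, hst⟩
    · rintro ⟨t, (rfl | ht), hst⟩
      · exact Or.inl hst
      · exact Or.inr ⟨t, ht, hst⟩

-- lowercasing distributes over the '\n'-join (lower is per-character and fixes '\n')
lemma pv_lower_join :
    ∀ (l : List Char) (ls : List (List Char)),
      PySem.Chars.lower (PySem.Chars.join ['\n'] (l :: ls))
        = PySem.Chars.join ['\n'] (PySem.Chars.lower l :: ls.map PySem.Chars.lower) := by
  have hmap : PySem.Chars.lower = List.map PySem.Chars.lowerChar := rfl
  intro l ls
  induction ls generalizing l with
  | nil => simp [PySem.Chars.join_singleton]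
  | cons l' ls' ih =>
    rw [PySem.Chars.join_cons_cons, List.map_cons, PySem.Chars.join_cons_cons, ← ih l']
    rw [hmap]
    simp [show PySem.Chars.lowerChar '\n' = '\n' from by decide]

-- the positional scan finds a nonempty pattern iff it is an infix
lemma pv_exists_start (s text : List Char) (hs : s ≠ []) :
    (∃ i ∈ List.range text.length, PySem.Chars.startswith (text.drop i) s = true) ↔
      s <:+: text := by
  constructor
  · rintro ⟨i, -, hi⟩
    have hp : s <+: text.drop i := (PySem.Chars.startswith_iff _ _).mp hi
    exact hp.isInfix.trans (List.drop_suffix i text).isInfix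
  · intro h
    have : ∃ j, s <+: text.drop j :=
      (PySem.Chars.exists_prefix_drop_iff_isIn s text).mpr ((PySem.Chars.isIn_iff_infix s text).mpr h)
    rcases this with ⟨j, hj⟩
    by_cases hjl : j < text.length
    · exact ⟨j, List.mem_range.mpr hjl, (PySem.Chars.startswith_iff _ _).mpr hj⟩
    · exfalso
      rw [List.drop_eq_nil_of_le (by omega)] at hj
      exact hs (List.prefix_nil.mp hj)

-- ===== VERDICT (by name: the statement is the Claim_ definition above) =====
theorem extract_color_constraints_py_spec : Claim_equal_extract_color_constraints_py := by
  intro constraints preferences raw_message _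
  unfold Spec_extract_color_constraints_py extract_color_constraints_py extract_color_constraints_py_alt
  have hK : (PySem.Set.ofList pvColorKeys : List String) = pvColorKeys := by decide
  simp only [hK]
  apply List.filter_congr
  intro c hc
  have hfacts : ∀ x ∈ pvColorKeys,
      x.toList ≠ [] ∧ '\n' ∉ x.toList ∧ x ∈ pvByFirst (x.toList.headD ' ') := by decide
  have hne : c.toList ≠ [] := (hfacts c hc).1
  have hnl : '\n' ∉ c.toList := (hfacts c hc).2.1
  rw [Bool.eq_iff_iff, PySem.Set.contains_iff, PySem.Set.contains_iff,
    pv_mem_scan (fun _ => pvColorKeys), pv_mem_scan]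
  simp only [PySem.Set.empty, List.not_mem_nil, false_or]
  -- the first-letter bucket test is redundant for an in-range match of c
  have hbridge : ∀ text : List Char,
      (∃ i ∈ List.range text.length,
          c ∈ pvByFirst (text.getD i ' ') ∧ PySem.Chars.startswith (text.drop i) c.toList = true)
        ↔ ∃ i ∈ List.range text.length, PySem.Chars.startswith (text.drop i) c.toList = true := by
    intro text
    constructor
    · rintro ⟨i, hi, -, hs⟩; exact ⟨i, hi, hs⟩
    · rintro ⟨i, hi, hs⟩
      refine ⟨i, hi, ?_, hs⟩
      rcases (PySem.Chars.startswith_iff _ _).mp hs with ⟨u, hu⟩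
      cases hcl : c.toList with
      | nil => exact absurd hcl hne
      | cons ch rest =>
        have hdrop : text.drop i = ch :: (rest ++ u) := by
          rw [← hu, hcl]; simp
        have hgetD : text.getD i ' ' = ch := by
          rw [List.getD_eq_getElem?_getD, ← List.head?_drop, hdrop]
          rfl
        have := (hfacts c hc).2.2
        rwa [hcl, hgetD] at *
  rw [hbridge, pv_exists_start _ _ hne]
  -- name the (nonempty) source list and split the join
  have hsrc : constraints ++ (preferences.getD []) ++ [raw_message] ≠ [] := by simp
  rcases List.exists_cons_of_ne_nil hsrc with ⟨l, ls, hls⟩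
  rw [hls, List.map_cons, pv_lower_join, pv_infix_join _ hnl]
  simp only [List.mem_cons, List.mem_map, PySem.Str.isIn_iff_infix, PySem.Str.toList_lower]
  constructor
  · rintro ⟨t, ht, -, hxt⟩
    rcases ht with rfl | ht
    · exact ⟨_, Or.inl rfl, hxt⟩
    · exact ⟨_, Or.inr ⟨_, ⟨t, ht, rfl⟩, rfl⟩, hxt⟩
  · rintro ⟨u, hu, hxu⟩
    rcases hu with rfl | ⟨a, ⟨t, ht, rfl⟩, rfl⟩
    · exact ⟨l, Or.inl rfl, hc, hxu⟩
    · exact ⟨t, Or.inr ht, hc, hxu⟩
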